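-- pv_equiv track=rewrite | github.com/Fenixcrowlite/ros2_ASR | web_gui/app/aws_auth_store.py | dump_env_like_text
-- ===== SOURCE A (Python) =====
-- KNOWN_AWS_AUTH_KEYS = [
--     "AWS_AUTH_TYPE",
--     "AWS_PROFILE",
--     "AWS_REGION",
--     "AWS_S3_BUCKET",
--     "AWS_ACCESS_KEY_ID",
--     "AWS_SECRET_ACCESS_KEY",
--     "AWS_SESSION_TOKEN",
--     "AWS_SSO_START_URL",
--     "AWS_SSO_REGION",
--     "AWS_SSO_ACCOUNT_ID",
--     "AWS_SSO_ROLE_NAME",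
--     "AWS_SSO_SESSION_NAME",
-- ]
--
-- def dump_env_like_text(values: dict[str, str]) -> str:
--     """Render dict into deterministic KEY=VALUE text profile."""
--     normalized = {str(k).strip().upper(): str(v).strip() for k, v in values.items()}
--     rows: list[str] = []
--     emitted: set[str] = set()
--     for key in KNOWN_AWS_AUTH_KEYS:
--         value = normalized.get(key, "")
--         if not value:
--             continue
--         rows.append(f"{key}={value}")
--         emitted.add(key)
--     for key in sorted(normalized.keys()):
--         if key in emitted:
--             continue
--         value = normalized[key]
--         if value:
--             rows.append(f"{key}={value}")
--     return "\n".join(rows) + ("\n" if rows else "")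
-- ===== SOURCE B (Python) =====
-- KNOWN_AWS_AUTH_KEYS = [
--     "AWS_AUTH_TYPE",
--     "AWS_PROFILE",
--     "AWS_REGION",
--     "AWS_S3_BUCKET",
--     "AWS_ACCESS_KEY_ID",
--     "AWS_SECRET_ACCESS_KEY",
--     "AWS_SESSION_TOKEN",
--     "AWS_SSO_START_URL",
--     "AWS_SSO_REGION",
--     "AWS_SSO_ACCOUNT_ID",
--     "AWS_SSO_ROLE_NAME",
--     "AWS_SSO_SESSION_NAME",
-- ]
--
-- def dump_env_like_text(values: dict[str, str]) -> str:
--     """Render dict into deterministic KEY=VALUE text profile (single sorted pass)."""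
--     normalized = {str(k).strip().upper(): str(v).strip() for k, v in values.items()}
--     rank = {k: i for i, k in enumerate(KNOWN_AWS_AUTH_KEYS)}
--     fallback = len(KNOWN_AWS_AUTH_KEYS)
--     pairs = sorted(
--         ((k, v) for k, v in normalized.items() if v),
--         key=lambda kv: (rank.get(kv[0], fallback), kv[0]),
--     )
--     rows = [f"{k}={v}" for k, v in pairs]
--     return "\n".join(rows) + ("\n" if rows else "")
-- ===== Notes on version B (the rewrite author's own statement) =====
-- stated objective: alternative
-- what changed: A's two emission loops (known keys in priority order, then sorted leftover keys guarded by an `emitted` set) are replaced by one pass that filters the non-empty normalized items and sorts them once with the composite key (rank-of-known-key-or-fallback, key).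
import Mathlib
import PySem

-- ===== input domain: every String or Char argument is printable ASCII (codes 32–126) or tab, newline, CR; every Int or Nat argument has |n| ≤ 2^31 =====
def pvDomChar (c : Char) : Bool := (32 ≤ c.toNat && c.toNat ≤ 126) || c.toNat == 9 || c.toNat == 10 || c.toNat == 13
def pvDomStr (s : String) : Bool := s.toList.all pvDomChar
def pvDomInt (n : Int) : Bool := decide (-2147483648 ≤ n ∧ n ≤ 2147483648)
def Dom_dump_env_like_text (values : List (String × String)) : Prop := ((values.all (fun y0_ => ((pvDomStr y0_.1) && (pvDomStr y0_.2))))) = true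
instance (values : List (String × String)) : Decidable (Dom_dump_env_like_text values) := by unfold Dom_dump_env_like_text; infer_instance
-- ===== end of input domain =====

-- B replaces A's two emission loops and the `emitted` set by one rank-keyed sort of the
-- non-empty normalized items (objective: alternative — same cost, single sorted pass).

def pvKnownAwsAuthKeys : List String :=
  ["AWS_AUTH_TYPE", "AWS_PROFILE", "AWS_REGION", "AWS_S3_BUCKET",
   "AWS_ACCESS_KEY_ID", "AWS_SECRET_ACCESS_KEY", "AWS_SESSION_TOKEN",
   "AWS_SSO_START_URL", "AWS_SSO_REGION", "AWS_SSO_ACCOUNT_ID",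
   "AWS_SSO_ROLE_NAME", "AWS_SSO_SESSION_NAME"]

-- ===== PORT A =====
-- (the dict parameter arrives as an association list; PySem.Dict.ofList is dict(values),
--  the shared parameter decoding of both ports; `normalized[key]` in the second loop can
--  never raise — key ranges over normalized.keys — so getD "" is exact there)
def dump_env_like_text (values : List (String × String)) : String :=
  let normalized : PySem.Dict String String :=
    (PySem.Dict.ofList values).items.foldl
      (fun d p => d.insert (PySem.Str.upper (PySem.Str.strip p.1)) (PySem.Str.strip p.2))
      PySem.Dict.empty
  let st :=
    pvKnownAwsAuthKeys.foldl
      (fun (st : List String × PySem.Set String) key =>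
        let value := normalized.getD key ""
        if value = "" then st
        else (st.1 ++ [key ++ "=" ++ value], PySem.Set.add st.2 key))
      ([], PySem.Set.empty)
  let rows :=
    (PySem.List.sorted normalized.keys (fun k => k)).foldl
      (fun rows key =>
        if PySem.Set.contains st.2 key then rows
        else
          let value := normalized.getD key ""
          if value = "" then rows else rows ++ [key ++ "=" ++ value])
      st.1
  PySem.Str.join "\n" rows ++ (if rows = [] then "" else "\n")

-- ===== PORT B =====
def dump_env_like_text_alt (values : List (String × String)) : String :=
  let normalized : PySem.Dict String String :=
    (PySem.Dict.ofList values).items.foldl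
      (fun d p => d.insert (PySem.Str.upper (PySem.Str.strip p.1)) (PySem.Str.strip p.2))
      PySem.Dict.empty
  let rank : PySem.Dict String Int :=
    (PySem.List.enumerate pvKnownAwsAuthKeys 0).foldl (fun d p => d.insert p.2 p.1)
      PySem.Dict.empty
  let fallback := PySem.List.len pvKnownAwsAuthKeys
  let pairs :=
    PySem.List.sorted2 (normalized.items.filter (fun p => !(p.2 == "")))
      (fun p => rank.getD p.1 fallback) (fun p => p.1)
  let rows := pairs.map (fun p => p.1 ++ "=" ++ p.2)
  PySem.Str.join "\n" rows ++ (if rows = [] then "" else "\n")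

-- ===== PRECONDITION & SPEC =====
def Spec_dump_env_like_text (values : List (String × String)) (out : String) : Prop := out = dump_env_like_text_alt values
instance (values : List (String × String)) (out : String) : Decidable (Spec_dump_env_like_text values out) := by unfold Spec_dump_env_like_text; infer_instance

-- ===== CLAIM (what is proved, stated in full; the proofs are below) =====
def Claim_equal_dump_env_like_text : Prop := ∀ (values : List (String × String)), Dom_dump_env_like_text values → Spec_dump_env_like_text values (dump_env_like_text values)

-- ===== LEMMAS AND PROOFS =====

-- proof-only abbreviations, all definitionally equal to subterms of the two ports
def pvRank : PySem.Dict String Int :=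
  (PySem.List.enumerate pvKnownAwsAuthKeys 0).foldl (fun d p => d.insert p.2 p.1)
    PySem.Dict.empty

def pvRnk (k : String) : Int := pvRank.getD k (PySem.List.len pvKnownAwsAuthKeys)

def pvPredB (N : PySem.Dict String String) (k : String) : Bool := !(N.getD k "" == "")

def pvFmt (N : PySem.Dict String String) (k : String) : String := k ++ "=" ++ N.getD k ""

def pvPair (N : PySem.Dict String String) (k : String) : String × String := (k, N.getD k "")

def pvLoop1 (N : PySem.Dict String String) : List String × PySem.Set String :=
  pvKnownAwsAuthKeys.foldl
    (fun st key =>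
      if N.getD key "" = "" then st
      else (st.1 ++ [key ++ "=" ++ N.getD key ""], PySem.Set.add st.2 key))
    ([], PySem.Set.empty)

def pvRowsA (N : PySem.Dict String String) : List String :=
  (PySem.List.sorted N.keys (fun k => k)).foldl
    (fun rows key =>
      if PySem.Set.contains (pvLoop1 N).2 key then rows
      else if N.getD key "" = "" then rows else rows ++ [key ++ "=" ++ N.getD key ""])
    (pvLoop1 N).1

def pvRowsB (N : PySem.Dict String String) : List String :=
  (PySem.List.sorted2 (N.items.filter (fun p => !(p.2 == "")))
      (fun p => pvRnk p.1) (fun p => p.1)).map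
    (fun p => p.1 ++ "=" ++ p.2)

lemma pvRnk_lt_of_mem : ∀ k ∈ pvKnownAwsAuthKeys, pvRnk k < 12 := by decide

lemma pvKnown_pairwise : pvKnownAwsAuthKeys.Pairwise (fun a b => pvRnk a < pvRnk b) := by decide

lemma pvKnown_nodup : pvKnownAwsAuthKeys.Nodup := by decide

lemma pvRank_keys : pvRank.keys = PySem.Set.ofList pvKnownAwsAuthKeys := by
  have hk := PySem.Dict.keys_foldl_insert_key (κ := String) (ν := Int)
      (PySem.List.enumerate pvKnownAwsAuthKeys 0) (fun p => p.2) (fun _ p => p.1)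
      PySem.Dict.empty
  rw [PySem.List.map_snd_enumerate] at hk
  exact hk

lemma pvRnk_of_not_mem (k : String) (h : k ∉ pvKnownAwsAuthKeys) : pvRnk k = 12 := by
  have hc : pvRank.contains k = false := by
    rw [← Bool.not_eq_true]
    intro hcon
    apply h
    have hm := (PySem.Dict.contains_iff_mem_keys pvRank k).mp hcon
    rw [pvRank_keys] at hm
    exact (PySem.Set.mem_ofList pvKnownAwsAuthKeys k).mp hm
  unfold pvRnk
  rw [PySem.Dict.getD_of_not_contains _ _ hc]
  decide

-- sorted2 with an (Int, String) key equals any strictly lex-increasing rearrangement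
lemma pv_sorted2_eq {α : Type} (xs ys : List α) (k1 : α → Int) (k2 : α → String)
    (hperm : ys.Perm xs)
    (hpw : ys.Pairwise (fun a b => k1 a < k1 b ∨ (k1 a = k1 b ∧ k2 a < k2 b)))
    (hinj : ∀ a b, a ∈ xs → b ∈ ys → k1 a = k1 b → k2 a = k2 b → a = b) :
    PySem.List.sorted2 xs k1 k2 = ys := by
  have hkey : ∀ a b : α, (decide (k1 a < k1 b) || (!decide (k1 b < k1 a) && decide (k2 a < k2 b)))
      = decide ((fun x => toLex (k1 x, k2 x)) a < (fun x => toLex (k1 x, k2 x)) b) := by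
    intro a b
    rw [Bool.eq_iff_iff]
    simp only [Bool.or_eq_true, Bool.and_eq_true, Bool.not_eq_true',
      decide_eq_true_eq, decide_eq_false_iff_not, Prod.Lex.lt_iff, ofLex_toLex]
    constructor
    · rintro (h | ⟨hn, h2⟩)
      · exact Or.inl h
      · rcases lt_trichotomy (k1 a) (k1 b) with h | h | h
        · exact Or.inl h
        · exact Or.inr ⟨h, h2⟩
        · exact absurd h hn
    · rintro (h | ⟨he, h2⟩)
      · exact Or.inl h
      · exact Or.inr ⟨by simp [he], h2⟩
  have hS : PySem.List.sorted2 xs k1 k2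
      = xs.foldl (fun acc x => PySem.List.insertBy
          (fun a b => decide ((fun x => toLex (k1 x, k2 x)) a < (fun x => toLex (k1 x, k2 x)) b)) x acc) [] := by
    have h0 : PySem.List.sorted2 xs k1 k2
        = xs.foldl (fun acc x => PySem.List.insertBy
            (fun a b => decide (k1 a < k1 b) || (!decide (k1 b < k1 a) && decide (k2 a < k2 b))) x acc) [] := rfl
    rw [h0]
    congr 1
    funext acc x
    congr 1
    funext a b
    exact hkey a b
  have hpair : ∀ (l acc : List α),
      acc.Pairwise (fun a b => (fun x => toLex (k1 x, k2 x)) a ≤ (fun x => toLex (k1 x, k2 x)) b) →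
      (l.foldl (fun acc x => PySem.List.insertBy
          (fun a b => decide ((fun x => toLex (k1 x, k2 x)) a < (fun x => toLex (k1 x, k2 x)) b)) x acc) acc).Pairwise
        (fun a b => (fun x => toLex (k1 x, k2 x)) a ≤ (fun x => toLex (k1 x, k2 x)) b) := by
    intro l
    induction l with
    | nil => intro acc h; exact h
    | cons x t ih =>
      intro acc h
      exact ih _ (PySem.List.insertBy_pairwise_le (fun x => toLex (k1 x, k2 x)) x acc h)
  have hSperm : (PySem.List.sorted2 xs k1 k2).Perm ys :=
    (PySem.List.sorted2_perm xs k1 k2 false).trans hperm.symm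
  apply List.Perm.eq_of_pairwise
    (le := fun a b => (fun x => toLex (k1 x, k2 x)) a ≤ (fun x => toLex (k1 x, k2 x)) b)
  · intro a b ha hb hab hba
    have hmem : a ∈ xs := (PySem.List.sorted2_perm xs k1 k2 false).mem_iff.mp ha
    have heq : toLex (k1 a, k2 a) = toLex (k1 b, k2 b) := le_antisymm hab hba
    have hpeq : (k1 a, k2 a) = (k1 b, k2 b) := by simpa using heq
    exact hinj a b hmem hb (congrArg Prod.fst hpeq) (congrArg Prod.snd hpeq)
  · rw [hS]; exact hpair xs [] (by simp)
  · refine hpw.imp ?_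
    intro a b h
    refine le_of_lt ?_
    rw [Prod.Lex.lt_iff]
    simpa using h
  · exact hSperm

lemma pv_loop1_gen (N : PySem.Dict String String) (ks : List String)
    (r0 : List String) (e0 : PySem.Set String) :
    ks.foldl
      (fun st key =>
        if N.getD key "" = "" then st
        else (st.1 ++ [key ++ "=" ++ N.getD key ""], PySem.Set.add st.2 key))
      (r0, e0)
    = (r0 ++ (ks.filter (pvPredB N)).map (pvFmt N),
       PySem.Set.update e0 (ks.filter (pvPredB N))) := by
  induction ks generalizing r0 e0 with
  | nil => simp [PySem.Set.update]
  | cons k t ih =>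
    simp only [List.foldl_cons, List.filter_cons]
    by_cases h : N.getD k "" = ""
    · have hp : pvPredB N k = false := by simp [pvPredB, h]
      simp [h, hp, ih]
    · have hp : pvPredB N k = true := by simp [pvPredB, h]
      simp only [h, hp, if_pos, ih, PySem.Set.update, List.foldl_cons]
      simp [pvFmt]

lemma pv_loop1_eq (N : PySem.Dict String String) :
    pvLoop1 N = ((pvKnownAwsAuthKeys.filter (pvPredB N)).map (pvFmt N),
                 PySem.Set.ofList (pvKnownAwsAuthKeys.filter (pvPredB N))) := by
  unfold pvLoop1
  rw [pv_loop1_gen]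
  simp [PySem.Set.ofList_eq_foldl, PySem.Set.update, PySem.Set.empty]

lemma pv_loop2_gen (N : PySem.Dict String String) (em : PySem.Set String)
    (S r0 : List String) :
    S.foldl
      (fun rows key =>
        if PySem.Set.contains em key then rows
        else if N.getD key "" = "" then rows else rows ++ [key ++ "=" ++ N.getD key ""])
      r0
    = r0 ++ (S.filter (fun k => !PySem.Set.contains em k && pvPredB N k)).map (pvFmt N) := by
  have hb : (fun (rows : List String) key =>
        if PySem.Set.contains em key then rows
        else if N.getD key "" = "" then rows else rows ++ [key ++ "=" ++ N.getD key ""])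
      = fun rows key =>
        if (!PySem.Set.contains em key && pvPredB N key) then rows ++ [pvFmt N key] else rows := by
    funext rows key
    by_cases h1 : PySem.Set.contains em key <;> by_cases h2 : N.getD key "" = "" <;>
      simp [h2, pvPredB, pvFmt]
  rw [hb, PySem.List.foldl_append_if]

lemma pv_rows_eq (N : PySem.Dict String String) (hnd : N.keys.Nodup) :
    pvRowsA N = pvRowsB N := by
  have hpred_mem : ∀ k, pvPredB N k = true → k ∈ N.keys := by
    intro k hp
    by_contra hk
    have hcf : N.contains k = false := by
      rw [← Bool.not_eq_true]
      intro hc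
      exact hk ((PySem.Dict.contains_iff_mem_keys N k).mp hc)
    have hd := PySem.Dict.getD_of_not_contains N "" hcf
    simp [pvPredB, hd] at hp
  have hSnodup : (PySem.List.sorted N.keys (fun k => k)).Nodup :=
    ((PySem.List.sorted_perm N.keys (fun k => k) false).nodup_iff).mpr hnd
  -- A side: the two loops become filter-map blocks
  simp only [pvRowsA, pv_loop1_eq N]
  rw [pv_loop2_gen]
  have hfq : (PySem.List.sorted N.keys (fun k => k)).filter
        (fun k => !PySem.Set.contains (PySem.Set.ofList (pvKnownAwsAuthKeys.filter (pvPredB N))) k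
                  && pvPredB N k)
      = (PySem.List.sorted N.keys (fun k => k)).filter
        (fun k => !(decide (k ∈ pvKnownAwsAuthKeys)) && pvPredB N k) := by
    apply List.filter_congr
    intro k _
    have hc := PySem.Set.contains_eq_decide
        (PySem.Set.ofList (pvKnownAwsAuthKeys.filter (pvPredB N))) k
    by_cases hm : k ∈ pvKnownAwsAuthKeys <;> by_cases hp : pvPredB N k = true <;>
      simp [PySem.Set.mem_ofList, List.mem_filter, hm, hp]
  rw [hfq]
  -- B side: one sorted pass over the non-empty items
  have hitems : N.items = N.keys.map (pvPair N) := PySem.Dict.items_eq_map_keys N hnd ""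
  have hcand : N.items.filter (fun p => !(p.2 == ""))
      = (N.keys.filter (pvPredB N)).map (pvPair N) := by
    rw [hitems, List.filter_map]
    rfl
  have hsort : PySem.List.sorted2 (N.items.filter (fun p => !(p.2 == "")))
        (fun p => pvRnk p.1) (fun p => p.1)
      = (pvKnownAwsAuthKeys.filter (pvPredB N)).map (pvPair N)
        ++ ((PySem.List.sorted N.keys (fun k => k)).filter
              (fun k => !(decide (k ∈ pvKnownAwsAuthKeys)) && pvPredB N k)).map (pvPair N) := by
    apply pv_sorted2_eq
    · -- the two blocks are a permutation of the non-empty items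
      rw [hcand, ← List.map_append]
      apply List.Perm.map
      refine (List.perm_ext_iff_of_nodup ?_ (hnd.filter _)).mpr ?_
      · refine List.Nodup.append (pvKnown_nodup.filter _) (hSnodup.filter _) ?_
        intro a ha hb
        have h1 : a ∈ pvKnownAwsAuthKeys := (List.mem_filter.mp ha).1
        have h2 := (List.mem_filter.mp hb).2
        simp [h1] at h2
      · intro a
        simp only [List.mem_append, List.mem_filter, PySem.List.mem_sorted,
          Bool.and_eq_true, Bool.not_eq_true', decide_eq_false_iff_not]
        have hpm := hpred_mem a
        by_cases hm : a ∈ pvKnownAwsAuthKeys <;> tauto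
    · -- the two blocks are strictly increasing under the (rank, key) order
      rw [← List.map_append, List.pairwise_map]
      simp only [pvPair]
      rw [List.pairwise_append]
      refine ⟨?_, ?_, ?_⟩
      · exact (List.Pairwise.sublist List.filter_sublist pvKnown_pairwise).imp
          (fun h => Or.inl h)
      · have hlt : (PySem.List.sorted N.keys (fun k => k)).Pairwise (fun a b => a < b) := by
          have hle := PySem.List.sorted_pairwise N.keys (fun k => k)
          have hne : (PySem.List.sorted N.keys (fun k => k)).Pairwise (fun a b => a ≠ b) :=
            hSnodup
          exact (hle.and hne).imp (fun h => lt_of_le_of_ne h.1 h.2)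
        refine List.Pairwise.imp_of_mem ?_
          (List.Pairwise.sublist List.filter_sublist hlt)
        intro a b ha hb hab
        have h12a : pvRnk a = 12 := by
          have := (List.mem_filter.mp ha).2
          simp only [Bool.and_eq_true, Bool.not_eq_true', decide_eq_false_iff_not] at this
          exact pvRnk_of_not_mem a this.1
        have h12b : pvRnk b = 12 := by
          have := (List.mem_filter.mp hb).2
          simp only [Bool.and_eq_true, Bool.not_eq_true', decide_eq_false_iff_not] at this
          exact pvRnk_of_not_mem b this.1
        exact Or.inr ⟨by rw [h12a, h12b], hab⟩
      · intro x hx y hy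
        have hxK : x ∈ pvKnownAwsAuthKeys := (List.mem_filter.mp hx).1
        have hyK : y ∉ pvKnownAwsAuthKeys := by
          have := (List.mem_filter.mp hy).2
          simp only [Bool.and_eq_true, Bool.not_eq_true', decide_eq_false_iff_not] at this
          exact this.1
        refine Or.inl ?_
        rw [pvRnk_of_not_mem y hyK]
        exact pvRnk_lt_of_mem x hxK
    · -- pairs with equal keys are equal: the value is determined by the key
      intro a b ha hb _ h2
      rw [hcand] at ha
      obtain ⟨ka, hka, hea⟩ := List.mem_map.mp ha
      have hbp : ∃ kb, pvPair N kb = b := by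
        rcases List.mem_append.mp hb with h | h
        · obtain ⟨k, _, he⟩ := List.mem_map.mp h
          exact ⟨k, he⟩
        · obtain ⟨k, _, he⟩ := List.mem_map.mp h
          exact ⟨k, he⟩
      obtain ⟨kb, heb⟩ := hbp
      rw [← hea, ← heb] at h2 ⊢
      simp only [pvPair] at h2
      rw [h2]
  simp only [pvRowsB, hsort, List.map_append, List.map_map]
  rfl

lemma pv_main (N : PySem.Dict String String) (hnd : N.keys.Nodup) :
    PySem.Str.join "\n" (pvRowsA N) ++ (if pvRowsA N = [] then "" else "\n")
    = PySem.Str.join "\n" (pvRowsB N) ++ (if pvRowsB N = [] then "" else "\n") := by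
  rw [pv_rows_eq N hnd]

-- ===== VERDICT (by name: the statement is the Claim_ definition above) =====
set_option maxHeartbeats 1000000 in
theorem dump_env_like_text_spec : Claim_equal_dump_env_like_text := by
  intro values _
  unfold Spec_dump_env_like_text dump_env_like_text dump_env_like_text_alt
  exact pv_main _
    (PySem.Dict.nodup_keys_foldl_insert_key (κ := String) (ν := String)
      ((PySem.Dict.ofList values).items)
      (fun p => PySem.Str.upper (PySem.Str.strip p.1)) (fun _ p => PySem.Str.strip p.2)
      PySem.Dict.empty PySem.Dict.nodup_keys_empty)
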